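-- pv_equiv track=rewrite | github.com/MiguelCacerex/AnalizadorLexico | operadoresLogicos.py | tipo_operador_logico
-- ===== SOURCE A (Python) =====
-- def tipo_operador_logico(entrada):
--     lexemas = []  # Lista para almacenar los lexemas encontrados
--     i = 0  # Variable de índice para recorrer la cadena de entrada
--
--     # Itera hasta el penúltimo carácter para verificar operadores de 2 caracteres
--     while i < len(entrada) - 1:
--         # Verifica si el segmento de 2 caracteres es un operador lógico
--         if entrada[i:i+2] in ('&&', '||'):
--             inicio = i  # Guarda la posición inicial del operador
--             lexema = entrada[i:i+2]  # Extrae el operador completo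
--             # Agrega el operador a la lista de lexemas
--             lexemas.append(('OPERADOR_LOGICO', lexema, inicio, inicio+1))
--             # Avanza al siguiente par de caracteres (operador de 2 caracteres)
--             i += 2
--         else:
--             i += 1  # Avanza al siguiente carácter si no es un operador lógico
--
--     if not lexemas:
--         return []  # Si no se encontraron operadores lógicos, retorna una lista vacía
--     else:
--         return lexemas  # Retorna la lista de lexemas encontrados
-- ===== SOURCE B (Python) =====
-- import re
--
-- def tipo_operador_logico(entrada):
--     return [('OPERADOR_LOGICO', m.group(), m.start(), m.start() + 1)
--             for m in re.finditer(r'&&|\|\|', entrada)]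
-- ===== Notes on version B (the rewrite author's own statement) =====
-- stated objective: idiomatic
-- what changed: Replaced the manual index-and-skip while-loop (slicing entrada[i:i+2] and appending to an accumulator) by a re.finditer(r'&&|\|\|') scan read off into a list comprehension.
import Mathlib
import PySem

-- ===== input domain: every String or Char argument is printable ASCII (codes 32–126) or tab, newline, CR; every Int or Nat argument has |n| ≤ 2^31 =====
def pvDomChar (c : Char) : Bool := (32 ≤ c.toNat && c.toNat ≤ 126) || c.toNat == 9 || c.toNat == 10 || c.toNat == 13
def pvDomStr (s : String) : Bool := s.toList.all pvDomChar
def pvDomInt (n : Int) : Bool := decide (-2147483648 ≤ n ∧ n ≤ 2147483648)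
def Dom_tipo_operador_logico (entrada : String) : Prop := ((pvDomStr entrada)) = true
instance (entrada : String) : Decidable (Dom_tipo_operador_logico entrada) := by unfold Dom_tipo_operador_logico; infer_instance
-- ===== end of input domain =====

-- B replaces A's manual index/skip while-loop with a regex scan (re.finditer(r'&&|\|\|', …)) read off
-- into the result list; same return value, more idiomatic.

-- ===== PORT A =====
-- A's while-loop: index i, accumulator lexemas, checks entrada[i:i+2] against ('&&','||').
def pvLoopA (cs : List Char) (i : Nat) (acc : List (String × String × Int × Int)) :
    List (String × String × Int × Int) :=
  if h : (i : Int) < (cs.length : Int) - 1 then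
    let seg := PySem.List.slice cs (some (i : Int)) (some ((i : Int) + 2))
    if seg = ['&', '&'] ∨ seg = ['|', '|'] then
      pvLoopA cs (i + 2) (acc ++ [("OPERADOR_LOGICO", String.ofList seg, (i : Int), (i : Int) + 1)])
    else
      pvLoopA cs (i + 1) acc
  else acc
termination_by cs.length - i
decreasing_by all_goals omega

def tipo_operador_logico (entrada : String) : List (String × String × Int × Int) :=
  let lexemas := pvLoopA entrada.toList 0 []
  if lexemas = [] then [] else lexemas

-- ===== PORT B =====
-- Hand port of re.finditer(r'&&|\|\|', entrada): the regex engine's non-overlapping left-to-right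
-- scan — at each position try '&&' then '||'; on a match emit it and resume after it, else step one
-- char.  This is exact for this pattern (both alternatives have length 2, no backtracking).
def pvScanB (cs : List Char) (pos : Int) : List (String × String × Int × Int) :=
  match cs with
  | c1 :: c2 :: rest =>
    if c1 = '&' ∧ c2 = '&' then ("OPERADOR_LOGICO", "&&", pos, pos + 1) :: pvScanB rest (pos + 2)
    else if c1 = '|' ∧ c2 = '|' then ("OPERADOR_LOGICO", "||", pos, pos + 1) :: pvScanB rest (pos + 2)
    else pvScanB (c2 :: rest) (pos + 1)
  | _ => []
termination_by cs.length
decreasing_by all_goals (simp only [List.length_cons]; omega)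

def tipo_operador_logico_alt (entrada : String) : List (String × String × Int × Int) :=
  pvScanB entrada.toList 0

-- ===== PRECONDITION & SPEC =====
def Spec_tipo_operador_logico (entrada : String) (out : List (String × String × Int × Int)) : Prop := out = tipo_operador_logico_alt entrada
instance (entrada : String) (out : List (String × String × Int × Int)) : Decidable (Spec_tipo_operador_logico entrada out) := by unfold Spec_tipo_operador_logico; infer_instance

-- ===== CLAIM (what is proved, stated in full; the proofs are below) =====
def Claim_equal_tipo_operador_logico : Prop := ∀ (entrada : String), Dom_tipo_operador_logico entrada → Spec_tipo_operador_logico entrada (tipo_operador_logico entrada)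

-- ===== LEMMAS AND PROOFS =====

-- Loop invariant: A's loop from index i, with accumulator acc, produces acc followed by
-- B's scan of the suffix cs.drop i started at position i.
theorem pvLoopA_eq_scan (cs : List Char) (i : Nat) (acc : List (String × String × Int × Int)) :
    pvLoopA cs i acc = acc ++ pvScanB (cs.drop i) (i : Int) := by
  induction hn : cs.length - i using Nat.strong_induction_on generalizing i acc with
  | _ n ih =>
  subst hn
  rw [pvLoopA]
  by_cases h : (i : Int) < (cs.length : Int) - 1
  · obtain ⟨a, b, rest, hdrop⟩ : ∃ a b rest, cs.drop i = a :: b :: rest := by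
      have hlen : 2 ≤ (cs.drop i).length := by rw [List.length_drop]; omega
      cases hcs : cs.drop i with
      | nil => rw [hcs] at hlen; norm_num at hlen
      | cons a t =>
        cases t with
        | nil => rw [hcs] at hlen; norm_num at hlen
        | cons b rest => exact ⟨a, b, rest, rfl⟩
    have hslice : PySem.List.slice cs (some (i : Int)) (some ((i : Int) + 2)) = [a, b] := by
      have := PySem.List.slice_natCast_add (xs := cs) (j := i) (n := 2)
      push_cast at this
      rw [this, hdrop]
      rfl
    have hrest2 : cs.drop (i + 2) = rest := by
      have h2 : cs.drop (i + 2) = (cs.drop i).drop 2 := by rw [List.drop_drop]; try ring_nf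
      rw [h2, hdrop]; rfl
    have hrest1 : cs.drop (i + 1) = b :: rest := by
      have h1 : cs.drop (i + 1) = (cs.drop i).drop 1 := by rw [List.drop_drop]; try ring_nf
      rw [h1, hdrop]; rfl
    simp only [h, dif_pos, hslice, hdrop]
    by_cases hop1 : [a, b] = ['&', '&']
    · obtain ⟨rfl, rfl⟩ : a = '&' ∧ b = '&' := by simpa using hop1
      rw [if_pos (Or.inl rfl)]
      rw [ih (cs.length - (i + 2)) (by omega) (i + 2) _ rfl, hrest2, pvScanB]
      rw [if_pos ⟨rfl, rfl⟩]
      push_cast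
      simp
    · by_cases hop2 : [a, b] = ['|', '|']
      · obtain ⟨rfl, rfl⟩ : a = '|' ∧ b = '|' := by simpa using hop2
        rw [if_pos (Or.inr rfl)]
        rw [ih (cs.length - (i + 2)) (by omega) (i + 2) _ rfl, hrest2, pvScanB]
        rw [if_neg (by simp), if_pos ⟨rfl, rfl⟩]
        push_cast
        simp
      · rw [if_neg (by tauto)]
        rw [ih (cs.length - (i + 1)) (by omega) (i + 1) acc rfl, hrest1, pvScanB]
        have h1 : ¬ (a = '&' ∧ b = '&') := by rintro ⟨rfl, rfl⟩; simp at hop1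
        have h2 : ¬ (a = '|' ∧ b = '|') := by rintro ⟨rfl, rfl⟩; simp at hop2
        rw [if_neg h1, if_neg h2]
        push_cast
        ring_nf
  · have hlen : (cs.drop i).length ≤ 1 := by rw [List.length_drop]; omega
    rw [dif_neg h]
    cases hcs : cs.drop i with
    | nil => simp [pvScanB]
    | cons c t =>
      cases t with
      | nil => simp [pvScanB]
      | cons d rest => rw [hcs] at hlen; norm_num at hlen

theorem if_empty_id (l : List (String × String × Int × Int)) :
    (if l = [] then ([] : List (String × String × Int × Int)) else l) = l := by
  by_cases h : l = [] <;> simp [h]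

-- ===== VERDICT (by name: the statement is the Claim_ definition above) =====
theorem tipo_operador_logico_spec : Claim_equal_tipo_operador_logico := by
  intro entrada _
  unfold Spec_tipo_operador_logico tipo_operador_logico tipo_operador_logico_alt
  simp only [if_empty_id, pvLoopA_eq_scan, List.drop_zero, List.nil_append, Nat.cast_zero]
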